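-- pv_equiv track=rewrite | github.com/Elroyper/ClawSentry | src/clawsentry/cli/initializers/kimi_cli.py | _remove_clawsentry_kimi_hook_blocks
-- ===== SOURCE A (Python) =====
-- _KIMI_HOOK_MARKER = "clawsentry harness --framework kimi-cli"
--
-- def _remove_clawsentry_kimi_hook_blocks(text: str) -> tuple[str, int]:
--     """Remove ``[[hooks]]`` blocks containing the ClawSentry command marker."""
--     lines = text.splitlines(keepends=True)
--     blocks: list[list[str]] = []
--     current: list[str] = []
--     for line in lines:
--         if line.strip() == "[[hooks]]" and current:
--             blocks.append(current)
--             current = [line]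
--         else:
--             current.append(line)
--     if current:
--         blocks.append(current)
--
--     kept: list[str] = []
--     removed = 0
--     for block in blocks:
--         block_text = "".join(block)
--         is_hook_block = any(line.strip() == "[[hooks]]" for line in block)
--         if is_hook_block and _KIMI_HOOK_MARKER in block_text:
--             removed += 1
--             continue
--         kept.append(block_text)
--     output = "".join(kept).rstrip() + ("\n" if kept else "")
--     return output, removed
-- ===== SOURCE B (Python) =====
-- _KIMI_HOOK_MARKER = "clawsentry harness --framework kimi-cli"
--
-- def _remove_clawsentry_kimi_hook_blocks(text: str) -> tuple[str, int]:
--     """Remove ``[[hooks]]`` blocks containing the ClawSentry command marker.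
--
--     One chopping pass: repeatedly slice off the next block (head line plus
--     every following line up to the next ``[[hooks]]`` line).  Since a block's
--     only possible ``[[hooks]]`` line is its head, testing the head line
--     replaces A's inner any() scan.
--     """
--     rest = text.splitlines(keepends=True)
--     kept: list[str] = []
--     removed = 0
--     while rest:
--         k = 1
--         while k < len(rest) and rest[k].strip() != "[[hooks]]":
--             k += 1
--         block = "".join(rest[:k])
--         if rest[0].strip() == "[[hooks]]" and _KIMI_HOOK_MARKER in block:
--             removed += 1
--         else:
--             kept.append(block)
--         rest = rest[k:]
--     return "".join(kept).rstrip() + ("\n" if kept else ""), removed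
-- ===== Notes on version B (the rewrite author's own statement) =====
-- stated objective: simpler
-- what changed: A's two passes (a fold that accumulates a blocks list with a trailing flush, then a second scan with an inner any() over each block) are replaced by one chopping loop that slices off the next block and classifies it by its head line alone, since a block can only contain a '[[hooks]]' line at its head.
import Mathlib
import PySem

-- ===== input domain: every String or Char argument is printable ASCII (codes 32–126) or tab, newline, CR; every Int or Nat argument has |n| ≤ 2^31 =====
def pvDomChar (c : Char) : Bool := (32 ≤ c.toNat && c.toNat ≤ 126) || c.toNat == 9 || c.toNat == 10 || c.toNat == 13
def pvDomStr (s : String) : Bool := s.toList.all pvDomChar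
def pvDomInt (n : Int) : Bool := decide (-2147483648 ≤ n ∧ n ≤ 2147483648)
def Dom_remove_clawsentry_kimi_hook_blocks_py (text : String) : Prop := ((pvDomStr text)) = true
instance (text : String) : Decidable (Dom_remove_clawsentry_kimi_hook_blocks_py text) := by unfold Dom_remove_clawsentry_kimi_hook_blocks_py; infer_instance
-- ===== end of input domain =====

-- B replaces A's two passes (fold building a block list, then a scan with an inner any())
-- by one chopping recursion that slices off a block at a time and tests only its head line
-- (objective: simpler / alternative decomposition; no speed claim).

-- shared helper: text.splitlines(keepends=True).  Exact on Dom (printable ASCII + tab/\n/\r):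
-- the only line breaks there are '\n', '\r' and '\r\n'.
def pvSplitKeep : List Char → List Char → List (List Char)
  | [], acc => if acc.isEmpty then [] else [acc.reverse]
  | '\r' :: '\n' :: t, acc => (acc.reverse ++ ['\r', '\n']) :: pvSplitKeep t []
  | '\r' :: t, acc => (acc.reverse ++ ['\r']) :: pvSplitKeep t []
  | '\n' :: t, acc => (acc.reverse ++ ['\n']) :: pvSplitKeep t []
  | c :: t, acc => pvSplitKeep t (c :: acc)

def pvMarker : List Char := "clawsentry harness --framework kimi-cli".toList
def pvHooks : List Char := "[[hooks]]".toList

-- ===== PORT A =====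
def remove_clawsentry_kimi_hook_blocks_py (text : String) : String × Int :=
  let lines := pvSplitKeep text.toList []
  -- first loop: split lines into blocks at '[[hooks]]' lines
  let st := lines.foldl
    (fun (st : List (List (List Char)) × List (List Char)) line =>
      if PySem.Chars.strip line == pvHooks && !st.2.isEmpty then
        (st.1 ++ [st.2], [line])
      else
        (st.1, st.2 ++ [line]))
    ([], [])
  let blocks := if !st.2.isEmpty then st.1 ++ [st.2] else st.1
  -- second loop: drop hook blocks containing the marker
  let kr := blocks.foldl
    (fun (kr : List (List Char) × Int) block =>
      let blockText := block.flatten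
      let isHookBlock := block.any (fun line => PySem.Chars.strip line == pvHooks)
      if isHookBlock && PySem.Chars.isIn pvMarker blockText then
        (kr.1, kr.2 + 1)
      else
        (kr.1 ++ [blockText], kr.2))
    ([], 0)
  (String.ofList (PySem.Chars.rstrip kr.1.flatten ++ (if !kr.1.isEmpty then ['\n'] else [])), kr.2)

-- ===== PORT B =====
-- the while loop of Source B: chop off the next block (head line + lines up to the next
-- '[[hooks]]' line), decide it by its head line, recurse on the remainder
def pvAltLoop : List (List Char) → List (List Char) × Int
  | [] => ([], 0)
  | l :: rest =>
    let body := rest.takeWhile (fun x => !(PySem.Chars.strip x == pvHooks))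
    let kr := pvAltLoop (rest.dropWhile (fun x => !(PySem.Chars.strip x == pvHooks)))
    let blockText := (l :: body).flatten
    if PySem.Chars.strip l == pvHooks && PySem.Chars.isIn pvMarker blockText then
      (kr.1, kr.2 + 1)
    else
      (blockText :: kr.1, kr.2)
  termination_by lines => lines.length
  decreasing_by
    simpa using Nat.lt_succ_of_le (List.length_dropWhile_le _ _)

def remove_clawsentry_kimi_hook_blocks_py_alt (text : String) : String × Int :=
  let kr := pvAltLoop (pvSplitKeep text.toList [])
  (String.ofList (PySem.Chars.rstrip kr.1.flatten ++ (if !kr.1.isEmpty then ['\n'] else [])), kr.2)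

-- ===== PRECONDITION & SPEC =====
def Spec_remove_clawsentry_kimi_hook_blocks_py (text : String) (out : String × Int) : Prop := out = remove_clawsentry_kimi_hook_blocks_py_alt text
instance (text : String) (out : String × Int) : Decidable (Spec_remove_clawsentry_kimi_hook_blocks_py text out) := by unfold Spec_remove_clawsentry_kimi_hook_blocks_py; infer_instance

-- ===== CLAIM (what is proved, stated in full; the proofs are below) =====
def Claim_equal_remove_clawsentry_kimi_hook_blocks_py : Prop := ∀ (text : String), Dom_remove_clawsentry_kimi_hook_blocks_py text → Spec_remove_clawsentry_kimi_hook_blocks_py text (remove_clawsentry_kimi_hook_blocks_py text)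

-- ===== LEMMAS AND PROOFS =====

-- A's block decomposition, written as B chops
def pvChop : List (List Char) → List (List (List Char))
  | [] => []
  | l :: rest =>
    (l :: rest.takeWhile (fun x => !(PySem.Chars.strip x == pvHooks))) ::
      pvChop (rest.dropWhile (fun x => !(PySem.Chars.strip x == pvHooks)))
  termination_by lines => lines.length
  decreasing_by
    simpa using Nat.lt_succ_of_le (List.length_dropWhile_le _ _)

-- running A's first loop from a NONEMPTY current, then flushing, yields this
def pvConsume : List (List Char) → List (List Char) → List (List (List Char))
  | [], C => [C]
  | l :: t, C =>
    if PySem.Chars.strip l == pvHooks then C :: pvConsume t [l] else pvConsume t (C ++ [l])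

theorem pvChop_nil : pvChop [] = [] := by rw [pvChop.eq_def]

theorem pvChop_cons (l : List Char) (rest : List (List Char)) :
    pvChop (l :: rest) =
      (l :: rest.takeWhile (fun x => !(PySem.Chars.strip x == pvHooks))) ::
        pvChop (rest.dropWhile (fun x => !(PySem.Chars.strip x == pvHooks))) := by
  rw [pvChop.eq_def]

theorem pvAltLoop_nil : pvAltLoop [] = ([], 0) := by rw [pvAltLoop.eq_def]

theorem pvAltLoop_cons (l : List Char) (rest : List (List Char)) :
    pvAltLoop (l :: rest) =
      (if PySem.Chars.strip l == pvHooks &&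
            PySem.Chars.isIn pvMarker
              ((l :: rest.takeWhile (fun x => !(PySem.Chars.strip x == pvHooks))).flatten) then
        ((pvAltLoop (rest.dropWhile (fun x => !(PySem.Chars.strip x == pvHooks)))).1,
          (pvAltLoop (rest.dropWhile (fun x => !(PySem.Chars.strip x == pvHooks)))).2 + 1)
      else
        ((l :: rest.takeWhile (fun x => !(PySem.Chars.strip x == pvHooks))).flatten ::
            (pvAltLoop (rest.dropWhile (fun x => !(PySem.Chars.strip x == pvHooks)))).1,
          (pvAltLoop (rest.dropWhile (fun x => !(PySem.Chars.strip x == pvHooks)))).2)) := by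
  rw [pvAltLoop.eq_def]

theorem pvConsume_eq_chop (lines : List (List Char)) :
    ∀ C : List (List Char),
      pvConsume lines C =
        (C ++ lines.takeWhile (fun x => !(PySem.Chars.strip x == pvHooks))) ::
          pvChop (lines.dropWhile (fun x => !(PySem.Chars.strip x == pvHooks))) := by
  induction lines with
  | nil => intro C; simp [pvConsume, pvChop]
  | cons l t ih =>
    intro C
    by_cases h : (PySem.Chars.strip l == pvHooks) = true
    · simp [pvConsume, h, List.takeWhile, List.dropWhile, ih [l], pvChop_cons]
    · simp only [Bool.not_eq_true] at h
      simp [pvConsume, h, List.takeWhile, List.dropWhile, ih (C ++ [l])]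

theorem pvFoldA_eq_consume (lines : List (List Char)) :
    ∀ (B : List (List (List Char))) (C : List (List Char)), C ≠ [] →
      (let st := lines.foldl
        (fun (st : List (List (List Char)) × List (List Char)) line =>
          if PySem.Chars.strip line == pvHooks && !st.2.isEmpty then (st.1 ++ [st.2], [line])
          else (st.1, st.2 ++ [line])) (B, C)
       if !st.2.isEmpty then st.1 ++ [st.2] else st.1) = B ++ pvConsume lines C := by
  induction lines with
  | nil => intro B C hC; simp [pvConsume, hC]
  | cons l t ih =>
    intro B C hC
    by_cases h : (PySem.Chars.strip l == pvHooks) = true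
    · simp only [beq_iff_eq] at h
      simpa [List.foldl_cons, h, List.isEmpty_iff, hC, pvConsume] using ih (B ++ [C]) [l] (by simp)
    · simp only [Bool.not_eq_true, beq_eq_false_iff_ne, ne_eq] at h
      simpa [List.foldl_cons, h, List.isEmpty_iff, hC, pvConsume] using ih B (C ++ [l]) (by simp [hC])

-- A's first loop (with its flush) produces exactly the chopped blocks
theorem pvBlocks_eq_chop (lines : List (List Char)) :
    (let st := lines.foldl
        (fun (st : List (List (List Char)) × List (List Char)) line =>
          if PySem.Chars.strip line == pvHooks && !st.2.isEmpty then (st.1 ++ [st.2], [line])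
          else (st.1, st.2 ++ [line])) ([], [])
     if !st.2.isEmpty then st.1 ++ [st.2] else st.1) = pvChop lines := by
  cases lines with
  | nil => simp [pvChop_nil]
  | cons l t =>
    have h1 : (if PySem.Chars.strip l == pvHooks && !(([] : List (List Char))).isEmpty then
        (([] : List (List (List Char))) ++ [[]], [l]) else ([], [] ++ [l])) = ([], [l]) := by simp
    rw [pvChop_cons]
    simpa [List.foldl_cons, h1, pvConsume_eq_chop t [l]]
      using pvFoldA_eq_consume t [] [l] (by simp)

-- in a chopped block the head line decides hook-ness: the body has no '[[hooks]]' line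
theorem pvAny_head (p : List Char → Bool) (l : List Char) (body : List (List Char))
    (hbody : ∀ x ∈ body, p x = false) :
    (l :: body).any p = p l := by
  cases h : p l
  · simp only [List.any_cons, h, Bool.false_or]
    simp only [List.any_eq_false]
    intro x hx; simp [hbody x hx]
  · simp [List.any_cons, h]

-- A's second loop over the chopped blocks is B's chopping recursion
theorem pvFoldB_eq_altLoop (lines : List (List Char)) :
    ∀ (K : List (List Char)) (R : Int),
      (pvChop lines).foldl
        (fun (kr : List (List Char) × Int) block =>
          let blockText := block.flatten
          let isHookBlock := block.any (fun line => PySem.Chars.strip line == pvHooks)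
          if isHookBlock && PySem.Chars.isIn pvMarker blockText then (kr.1, kr.2 + 1)
          else (kr.1 ++ [blockText], kr.2)) (K, R)
      = (K ++ (pvAltLoop lines).1, R + (pvAltLoop lines).2) := by
  induction lines using pvChop.induct with
  | case1 => intro K R; simp [pvChop_nil, pvAltLoop_nil]
  | case2 l rest ih =>
    intro K R
    have hbody : ∀ x ∈ rest.takeWhile (fun x => !(PySem.Chars.strip x == pvHooks)),
        (PySem.Chars.strip x == pvHooks) = false := by
      intro x hx
      simpa using List.mem_takeWhile_imp hx
    rw [pvChop_cons]
    simp only [List.foldl_cons]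
    rw [pvAny_head _ _ _ hbody, pvAltLoop_cons]
    by_cases h : (PySem.Chars.strip l == pvHooks &&
        PySem.Chars.isIn pvMarker
          ((l :: rest.takeWhile (fun x => !(PySem.Chars.strip x == pvHooks))).flatten)) = true
    · rw [if_pos h, if_pos h, ih K (R + 1)]
      exact Prod.ext rfl (by omega)
    · rw [if_neg h, if_neg h, ih (K ++ [(l :: rest.takeWhile (fun x => !(PySem.Chars.strip x == pvHooks))).flatten]) R]
      exact Prod.ext (by simp) rfl

-- ===== VERDICT (by name: the statement is the Claim_ definition above) =====
theorem remove_clawsentry_kimi_hook_blocks_py_spec : Claim_equal_remove_clawsentry_kimi_hook_blocks_py := by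
  intro text _
  unfold Spec_remove_clawsentry_kimi_hook_blocks_py
  unfold remove_clawsentry_kimi_hook_blocks_py remove_clawsentry_kimi_hook_blocks_py_alt
  simp only []
  rw [pvBlocks_eq_chop, pvFoldB_eq_altLoop (pvSplitKeep text.toList []) [] 0]
  simp
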